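-- pv_equiv track=rewrite | github.com/JohanNyholm/AdventOfCode | 4.py | criteria
-- ===== SOURCE A (Python) =====
-- def criteria(num_string):
--     if not len(num_string) == 6:
--         return False
--     has_pair = False
--     for first, second in zip(num_string, num_string[1:]):
--         if first > second:
--             return False
--         if first == second:
--             has_pair = True
--     return has_pair
-- ===== SOURCE B (Python) =====
-- def criteria(num_string):
--     if len(num_string) != 6:
--         return False
--     if list(num_string) != sorted(num_string):
--         return False
--     return any(a == b for a, b in zip(num_string, num_string[1:]))
-- ===== Notes on version B (the rewrite author's own statement) =====
-- stated objective: simpler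
-- what changed: Replaces the single fused early-return loop (monotonicity check and pair flag maintained together) with two independent passes: a sort-and-compare test for non-decreasing order, then a plain any() over adjacent pairs.
import Mathlib
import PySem

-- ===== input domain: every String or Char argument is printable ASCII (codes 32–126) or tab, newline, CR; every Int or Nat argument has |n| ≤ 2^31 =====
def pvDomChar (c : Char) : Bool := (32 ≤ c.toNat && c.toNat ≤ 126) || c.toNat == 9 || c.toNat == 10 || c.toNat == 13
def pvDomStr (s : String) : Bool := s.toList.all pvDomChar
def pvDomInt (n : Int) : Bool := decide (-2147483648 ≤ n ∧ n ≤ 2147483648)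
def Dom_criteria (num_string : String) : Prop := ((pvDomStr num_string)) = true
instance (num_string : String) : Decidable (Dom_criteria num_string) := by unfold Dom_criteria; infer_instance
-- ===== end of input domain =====

-- B replaces A's single fused early-return loop with two independent passes
-- (sort-and-compare for monotonicity, then an any() over adjacent pairs); objective: simpler.

-- ===== PORT A =====
-- the fused for-loop over zip(s, s[1:]) with the has_pair flag and early return
def criteriaLoopA : List (Char × Char) → Bool → Bool
  | [], hp => hp
  | (f, s) :: rest, hp =>
      if f > s then false
      else if f == s then criteriaLoopA rest true
      else criteriaLoopA rest hp

def criteria (num_string : String) : Bool :=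
  let cs := num_string.toList
  if ¬ (PySem.Str.len num_string == 6) then false
  else criteriaLoopA (cs.zip cs.tail) false

-- ===== PORT B =====
def criteria_alt (num_string : String) : Bool :=
  let cs := num_string.toList
  if PySem.Str.len num_string != 6 then false
  else if cs != PySem.List.sorted cs (fun x => x) false then false
  else (cs.zip cs.tail).any (fun p => p.1 == p.2)

-- ===== PRECONDITION & SPEC =====
def Spec_criteria (num_string : String) (out : Bool) : Prop := out = criteria_alt num_string
instance (num_string : String) (out : Bool) : Decidable (Spec_criteria num_string out) := by unfold Spec_criteria; infer_instance

-- ===== CLAIM (what is proved, stated in full; the proofs are below) =====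
def Claim_equal_criteria : Prop := ∀ (num_string : String), Dom_criteria num_string → Spec_criteria num_string (criteria num_string)

-- ===== LEMMAS AND PROOFS =====

-- A's loop equals: all adjacent pairs ordered AND (flag or some adjacent equal pair)
theorem criteriaLoopA_eq (ps : List (Char × Char)) (hp : Bool) :
    criteriaLoopA ps hp =
      ((ps.all (fun p => !(p.1 > p.2))) && (hp || ps.any (fun p => p.1 == p.2))) := by
  induction ps generalizing hp with
  | nil => simp [criteriaLoopA]
  | cons q rest ih =>
    obtain ⟨f, s⟩ := q
    by_cases hgt : f > s
    · simp [criteriaLoopA, hgt]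
    · by_cases heq : f = s
      · have hb : (f == s) = true := by simp [heq]
        simp [criteriaLoopA, hgt, heq, hb, ih]
      · have hb : (f == s) = false := by simp [heq]
        simp [criteriaLoopA, hgt, heq, hb, ih]

-- adjacent-pair all ≤ over zip with tail ↔ IsChain·
theorem zip_all_le_iff_isChain (cs : List Char) :
    ((cs.zip cs.tail).all (fun p => !(p.1 > p.2)) = true) ↔ cs.IsChain (· ≤ ·) := by
  induction cs with
  | nil => simp [List.isChain_nil]
  | cons a t ih =>
    cases t with
    | nil => simp [List.isChain_singleton]
    | cons b u =>
      simp only [List.tail_cons, List.zip_cons_cons, List.all_cons, Bool.and_eq_true,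
        List.isChain_cons_cons] at *
      constructor
      · rintro ⟨h1, h2⟩
        refine ⟨?_, ih.mp h2⟩
        simpa using h1
      · rintro ⟨h1, h2⟩
        exact ⟨by simpa using h1, ih.mpr h2⟩

theorem sorted_eq_self_iff_isChain (cs : List Char) :
    (PySem.List.sorted cs (fun x => x) false = cs) ↔ cs.IsChain (· ≤ ·) := by
  constructor
  · intro h
    have hp := PySem.List.sorted_pairwise cs (fun x => x)
    rw [h] at hp
    exact hp.isChain
  · intro h
    exact PySem.List.sorted_eq_self_of_pairwise cs (fun x => x) h.pairwise

-- ===== VERDICT (by name: the statement is the Claim_ definition above) =====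
theorem criteria_spec : Claim_equal_criteria := by
  intro num_string _
  unfold Spec_criteria criteria criteria_alt
  set cs := num_string.toList with hcs
  by_cases hlen : PySem.Str.len num_string = 6
  · simp only [hlen]
    by_cases hsort : PySem.List.sorted cs (fun x => x) false = cs
    · have hch := (sorted_eq_self_iff_isChain cs).mp hsort
      have hall := (zip_all_le_iff_isChain cs).mpr hch
      simp [hsort, criteriaLoopA_eq, hall]
    · have hnall : ¬ ((cs.zip cs.tail).all (fun p => !(p.1 > p.2)) = true) := by
        intro hall
        exact hsort ((sorted_eq_self_iff_isChain cs).mpr ((zip_all_le_iff_isChain cs).mp hall))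
      have hne : cs ≠ PySem.List.sorted cs (fun x => x) false := fun h => hsort h.symm
      simp [hne, criteriaLoopA_eq, hnall]
  · have hne : (↑num_string.length : Int) ≠ 6 := hlen
    simp [hne]
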